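-- pv_equiv track=rewrite | github.com/k0ntinuum/prefix-py | puts.py | _is_prefix_code
-- ===== SOURCE A (Python) =====
-- def _is_prefix_code(words):
--     for i in range(0, len(words)):
--         for j in range(0, len(words)):
--             if i == j:
--                 continue
--             if words[i].startswith(words[j]):
--                 return False
--     return True
-- ===== SOURCE B (Python) =====
-- def _is_prefix_code(words):
--     seen = set(words)
--     if len(seen) != len(words):
--         return False
--     for w in words:
--         for k in range(len(w)):
--             if w[:k] in seen:
--                 return False
--     return True
-- ===== Notes on version B (the rewrite author's own statement) =====
-- stated objective: alternative
-- what changed: Replaces the all-pairs nested startswith scan with a single duplicate check via set(words) plus, for each word, hashed membership lookups of its proper prefixes in that set.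
import Mathlib
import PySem

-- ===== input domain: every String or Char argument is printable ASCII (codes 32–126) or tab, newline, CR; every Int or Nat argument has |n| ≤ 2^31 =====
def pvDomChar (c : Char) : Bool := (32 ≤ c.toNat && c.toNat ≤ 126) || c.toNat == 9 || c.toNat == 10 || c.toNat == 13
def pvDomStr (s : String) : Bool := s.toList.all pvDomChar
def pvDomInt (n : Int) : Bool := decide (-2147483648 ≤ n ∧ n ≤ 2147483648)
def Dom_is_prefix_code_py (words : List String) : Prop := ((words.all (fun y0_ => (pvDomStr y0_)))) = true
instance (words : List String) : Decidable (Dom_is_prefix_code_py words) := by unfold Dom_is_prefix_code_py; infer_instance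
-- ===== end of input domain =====

-- B replaces A's all-pairs startswith scan by a duplicate check via set(words) plus a
-- proper-prefix-membership lookup in that set; same return value on every input.

-- ===== PORT A =====
-- the nested for-loops with early 'return False' are ported as the negation of 'any';
-- words[i] / words[j] (indices always in range here) are pyGetD with an unused default
def is_prefix_code_py (words : List String) : Bool :=
  !((PySem.List.pyRange 0 words.length 1).any fun i =>
      (PySem.List.pyRange 0 words.length 1).any fun j =>
        !(i == j) && PySem.Str.startswith (PySem.List.pyGetD words i "")
                                          (PySem.List.pyGetD words j ""))

-- ===== PORT B =====
-- the two loops with early 'return False' are ported as the negation of 'any'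
def is_prefix_code_py_alt (words : List String) : Bool :=
  let seen := PySem.Set.ofList words
  if PySem.Set.len seen ≠ words.length then false
  else
    !(words.any fun w =>
        (PySem.List.pyRange 0 (PySem.Str.len w) 1).any fun k =>
          PySem.Set.contains seen (PySem.Str.slice w none (some k)))

-- ===== PRECONDITION & SPEC =====
def Spec_is_prefix_code_py (words : List String) (out : Bool) : Prop := out = is_prefix_code_py_alt words
instance (words : List String) (out : Bool) : Decidable (Spec_is_prefix_code_py words out) := by unfold Spec_is_prefix_code_py; infer_instance

-- ===== CLAIM (what is proved, stated in full; the proofs are below) =====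
def Claim_equal_is_prefix_code_py : Prop := ∀ (words : List String), Dom_is_prefix_code_py words → Spec_is_prefix_code_py words (is_prefix_code_py words)

-- ===== LEMMAS AND PROOFS =====

-- 'some word is a prefix of another (or a duplicate of it)': what A's loop detects
def pvBadPair (words : List String) : Prop :=
  ∃ i j : Nat, ∃ _ : i < words.length, ∃ _ : j < words.length,
    i ≠ j ∧ words[j].toList <+: words[i].toList

-- what B's two checks detect
def pvBadB (words : List String) : Prop :=
  ¬ words.Nodup ∨ ∃ w ∈ words, ∃ k : Nat, k < w.toList.length ∧
      String.ofList (w.toList.take k) ∈ words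

-- len(set(xs)) = len(xs)  ↔  xs has no duplicates
theorem pvLenSet (xs : List String) :
    PySem.Set.len (PySem.Set.ofList xs) = (xs.length : Int) ↔ xs.Nodup := by
  constructor
  · intro h
    have h1 : (PySem.Set.ofList xs).length = xs.length := by
      simp [PySem.Set.len] at h; exact_mod_cast h
    have hnd : (PySem.Set.ofList xs).Nodup := PySem.Set.nodup_ofList xs
    have hfs : (PySem.Set.ofList xs).toFinset = xs.toFinset := by
      ext a; simp [PySem.Set.mem_ofList]
    have hlen : xs.dedup.length = xs.length := by
      have c1 := List.card_toFinset (PySem.Set.ofList xs)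
      have c2 := List.card_toFinset xs
      rw [← c2, ← hfs, c1, List.dedup_eq_self.mpr hnd, h1]
    exact List.dedup_eq_self.mp (List.Sublist.eq_of_length (List.dedup_sublist xs) hlen)
  · intro h
    rw [PySem.Set.ofList_eq_self_of_nodup xs h]
    simp [PySem.Set.len]

theorem pvA_false_iff (words : List String) :
    is_prefix_code_py words = false ↔ pvBadPair words := by
  unfold is_prefix_code_py pvBadPair
  simp only [Bool.not_eq_false', List.any_eq_true, PySem.List.mem_pyRange_one]
  constructor
  · rintro ⟨x, ⟨hx0, hxn⟩, y, ⟨hy0, hyn⟩, h⟩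
    simp only [Bool.and_eq_true, Bool.not_eq_eq_eq_not, Bool.not_true,
      beq_eq_false_iff_ne] at h
    obtain ⟨hne, hsw⟩ := h
    refine ⟨x.toNat, y.toNat, by omega, by omega, by omega, ?_⟩
    rw [show x = (x.toNat : Int) by omega, show y = (y.toNat : Int) by omega] at hsw
    rw [PySem.List.pyGetD_ofNat words x.toNat "" (by omega),
        PySem.List.pyGetD_ofNat words y.toNat "" (by omega)] at hsw
    simpa using (PySem.Chars.startswith_iff _ _).mp (by simpa using hsw)
  · rintro ⟨i, j, hi, hj, hne, hpre⟩
    refine ⟨i, ⟨by omega, by omega⟩, j, ⟨by omega, by omega⟩, ?_⟩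
    rw [PySem.List.pyGetD_ofNat words i "" hi, PySem.List.pyGetD_ofNat words j "" hj]
    simp only [Bool.and_eq_true]
    constructor
    · simp; omega
    · simpa using (PySem.Chars.startswith_iff _ _).mpr hpre

theorem pvB_false_iff (words : List String) :
    is_prefix_code_py_alt words = false ↔ pvBadB words := by
  unfold is_prefix_code_py_alt pvBadB
  by_cases hlen : PySem.Set.len (PySem.Set.ofList words) = (words.length : Int)
  · have hnd : words.Nodup := (pvLenSet words).mp hlen
    rw [if_neg (by omega)]
    simp only [Bool.not_eq_false', List.any_eq_true, PySem.List.mem_pyRange_one]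
    constructor
    · rintro ⟨w, hw, k, ⟨hk0, hkl⟩, hc⟩
      obtain ⟨k', rfl⟩ : ∃ k' : Nat, k = (k' : Int) := ⟨k.toNat, by omega⟩
      right
      have hkl' : k' < w.toList.length := by
        rw [String.length_toList]; simp at hkl; omega
      refine ⟨w, hw, k', hkl', ?_⟩
      have hsl : PySem.Str.slice w none (some (k' : Int)) = String.ofList (w.toList.take k') := by
        apply String.toList_inj.mp
        rw [String.toList_ofList]
        simp
      rw [hsl] at hc
      exact (PySem.Set.mem_ofList words _).mp ((PySem.Set.contains_iff _ _).mp hc)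
    · rintro (h | ⟨w, hw, k, hk, hmem⟩)
      · exact absurd hnd h
      · have hk' : k < w.length := by rw [← String.length_toList]; exact hk
        refine ⟨w, hw, (k : Int), ⟨by omega, by simp; omega⟩, ?_⟩
        have hsl : PySem.Str.slice w none (some (k : Int)) = String.ofList (w.toList.take k) := by
          apply String.toList_inj.mp
          rw [String.toList_ofList]
          simp
        rw [hsl]
        exact (PySem.Set.contains_iff _ _).mpr ((PySem.Set.mem_ofList words _).mpr hmem)
  · rw [if_pos (by omega)]
    simp only [true_iff]
    exact Or.inl (fun hnd => hlen ((pvLenSet words).mpr hnd))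

theorem pvBridge (words : List String) : pvBadPair words ↔ pvBadB words := by
  unfold pvBadPair pvBadB
  constructor
  · rintro ⟨i, j, hi, hj, hne, hpre⟩
    by_cases heq : words[i] = words[j]
    · exact Or.inl (fun hnd => hne ((List.Nodup.getElem_inj_iff hnd).mp heq))
    · right
      have hlt : words[j].toList.length < words[i].toList.length := by
        have hle := List.IsPrefix.length_le hpre
        rcases eq_or_lt_of_le hle with h | h
        · exact absurd (String.toList_inj.mp (List.IsPrefix.eq_of_length hpre h)).symm heq
        · exact h
      refine ⟨words[i], List.getElem_mem hi, words[j].toList.length, hlt, ?_⟩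
      rw [← List.prefix_iff_eq_take.mp hpre, String.ofList_toList]
      exact List.getElem_mem hj
  · rintro (hnd | ⟨w, hw, k, hk, hmem⟩)
    · rw [List.nodup_iff_injective_get] at hnd
      obtain ⟨a, b, hab, hne⟩ := Function.not_injective_iff.mp hnd
      exact ⟨a, b, a.isLt, b.isLt, fun h => hne (Fin.ext h),
        by simp only [List.get_eq_getElem] at hab; rw [hab]⟩
    · obtain ⟨i, hi, hwi⟩ := List.mem_iff_getElem.mp hw
      obtain ⟨j, hj, hwj⟩ := List.mem_iff_getElem.mp hmem
      refine ⟨i, j, hi, hj, ?_, ?_⟩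
      · intro h
        subst h
        have heq : w = String.ofList (w.toList.take k) := hwi.symm.trans hwj
        have h2 : w.toList = w.toList.take k := by simpa using congrArg String.toList heq
        have h3 := congrArg List.length h2
        simp at h3
        have h4 : w.toList.length = w.length := String.length_toList
        omega
      · rw [hwi, hwj, String.toList_ofList]
        exact List.take_prefix k w.toList

-- ===== VERDICT (by name: the statement is the Claim_ definition above) =====
theorem is_prefix_code_py_spec : Claim_equal_is_prefix_code_py := by
  intro words _
  unfold Spec_is_prefix_code_py
  have h := (pvA_false_iff words).trans ((pvBridge words).trans (pvB_false_iff words).symm)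
  cases hA : is_prefix_code_py words <;> cases hB : is_prefix_code_py_alt words <;> simp_all
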